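-- pv_equiv track=rewrite | github.com/sysdr/AI-Agent-Mastery | day2/secure-memory-agent/backend/services/pii_service.py | _classify_pii
-- ===== SOURCE A (Python) =====
-- from typing import Dict, List, Tuple
--
-- def _classify_pii(pii_found: List[Dict]) -> Dict:
--     """Classify PII by sensitivity level"""
--     classification = {
--         "high_sensitivity": [],
--         "medium_sensitivity": [],
--         "low_sensitivity": []
--     }
--
--     sensitivity_map = {
--         "ssn": "high_sensitivity",
--         "credit_card": "high_sensitivity",
--         "email": "medium_sensitivity",
--         "phone": "medium_sensitivity",
--         "ner_person": "medium_sensitivity",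
--         "contextual_identifier": "medium_sensitivity",
--         "ip_address": "low_sensitivity",
--         "url": "low_sensitivity"
--     }
--
--     for pii in pii_found:
--         sensitivity = sensitivity_map.get(pii["type"], "low_sensitivity")
--         classification[sensitivity].append(pii)
--
--     return classification
-- ===== SOURCE B (Python) =====
-- def _classify_pii(pii_found):
--     """Classify PII by sensitivity level (three filtering passes)."""
--     sensitivity_map = {
--         "ssn": "high_sensitivity",
--         "credit_card": "high_sensitivity",
--         "email": "medium_sensitivity",
--         "phone": "medium_sensitivity",
--         "ner_person": "medium_sensitivity",
--         "contextual_identifier": "medium_sensitivity",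
--         "ip_address": "low_sensitivity",
--         "url": "low_sensitivity"
--     }
--
--     def level(p):
--         return sensitivity_map.get(p["type"], "low_sensitivity")
--
--     return {
--         "high_sensitivity": [p for p in pii_found if level(p) == "high_sensitivity"],
--         "medium_sensitivity": [p for p in pii_found if level(p) == "medium_sensitivity"],
--         "low_sensitivity": [p for p in pii_found if level(p) == "low_sensitivity"],
--     }
-- ===== Notes on version B (the rewrite author's own statement) =====
-- stated objective: simpler
-- what changed: Replaces the single dispatch loop that appends into a pre-built dict of buckets with three independent filtering comprehensions (one per sensitivity level) assembled directly into the returned dict.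
import Mathlib
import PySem

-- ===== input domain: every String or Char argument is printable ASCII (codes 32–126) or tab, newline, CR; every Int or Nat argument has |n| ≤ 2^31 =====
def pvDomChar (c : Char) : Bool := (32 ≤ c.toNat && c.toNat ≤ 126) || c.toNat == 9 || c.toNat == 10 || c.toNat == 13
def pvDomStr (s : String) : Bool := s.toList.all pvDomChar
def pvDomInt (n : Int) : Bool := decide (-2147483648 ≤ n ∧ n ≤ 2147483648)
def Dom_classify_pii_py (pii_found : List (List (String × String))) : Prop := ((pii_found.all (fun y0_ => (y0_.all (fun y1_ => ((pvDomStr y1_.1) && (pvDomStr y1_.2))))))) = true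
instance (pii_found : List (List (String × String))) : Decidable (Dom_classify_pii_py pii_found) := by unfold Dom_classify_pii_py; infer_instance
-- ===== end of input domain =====

-- B replaces A's single dispatch loop into a dict of buckets with three independent
-- filtering passes, one per sensitivity level (objective: simpler decomposition).


-- ===== PORT A =====
-- the literal sensitivity_map of the Python
def pvSensMap : PySem.Dict String String :=
  PySem.Dict.ofList
    [("ssn", "high_sensitivity"), ("credit_card", "high_sensitivity"),
     ("email", "medium_sensitivity"), ("phone", "medium_sensitivity"),
     ("ner_person", "medium_sensitivity"), ("contextual_identifier", "medium_sensitivity"),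
     ("ip_address", "low_sensitivity"), ("url", "low_sensitivity")]

-- one loop step: pii["type"] (first-match lookup on the assoc list; none = KeyError,
-- excluded by Pre_), then classification[sensitivity].append(pii)
def pvStepA (acc : Option (PySem.Dict String (List (List (String × String)))))
    (pii : List (String × String)) :
    Option (PySem.Dict String (List (List (String × String)))) :=
  match acc with
  | none => none
  | some cls =>
    match pii.lookup "type" with
    | none => none
    | some ty =>
      let sensitivity := pvSensMap.getD ty "low_sensitivity"
      some (PySem.Dict.modify cls sensitivity [] (fun l => l ++ [pii]))

-- classification starts as the literal three-bucket dict
def pvClassification0 : PySem.Dict String (List (List (String × String))) :=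
  PySem.Dict.ofList
    [("high_sensitivity", []), ("medium_sensitivity", []), ("low_sensitivity", [])]

def classify_pii_py (pii_found : List (List (String × String))) :
    List (String × List (List (String × String))) :=
  match pii_found.foldl pvStepA (some pvClassification0) with
  | some cls => cls.items
  | none => []   -- unreachable under Pre_ (KeyError in Python)

-- ===== PORT B =====
-- sensitivity_map.get(p["type"], "low_sensitivity"); the none branch is unreachable under Pre_
def pvLevel (p : List (String × String)) : String :=
  match p.lookup "type" with
  | some ty => pvSensMap.getD ty "low_sensitivity"
  | none => "low_sensitivity"

def classify_pii_py_alt (pii_found : List (List (String × String))) :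
    List (String × List (List (String × String))) :=
  [("high_sensitivity", pii_found.filter (fun p => pvLevel p == "high_sensitivity")),
   ("medium_sensitivity", pii_found.filter (fun p => pvLevel p == "medium_sensitivity")),
   ("low_sensitivity", pii_found.filter (fun p => pvLevel p == "low_sensitivity"))]

-- ===== PRECONDITION & SPEC =====
-- Pre_ excludes exactly the inputs where pii["type"] raises KeyError (both A and B raise there)
def Pre_classify_pii_py (pii_found : List (List (String × String))) : Prop :=
  (pii_found.all (fun p => (p.lookup "type").isSome)) = true
instance (pii_found : List (List (String × String))) : Decidable (Pre_classify_pii_py pii_found) := by unfold Pre_classify_pii_py; infer_instance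

def pvWitness_classify_pii_py : (List (List (String × String))) :=
  [[("type", "ssn"), ("value", "123-45-6789")], [("type", "url"), ("value", "http://x")]]

def Spec_classify_pii_py (pii_found : List (List (String × String))) (out : List (String × List (List (String × String)))) : Prop := out = classify_pii_py_alt pii_found
instance (pii_found : List (List (String × String))) (out : List (String × List (List (String × String)))) : Decidable (Spec_classify_pii_py pii_found out) := by unfold Spec_classify_pii_py; infer_instance

-- ===== CLAIM (what is proved, stated in full; the proofs are below) =====
def Claim_equal_classify_pii_py : Prop := ∀ (pii_found : List (List (String × String))), Dom_classify_pii_py pii_found → Pre_classify_pii_py pii_found → Spec_classify_pii_py pii_found (classify_pii_py pii_found)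

-- ===== LEMMAS AND PROOFS =====

-- the mapped level of any string is one of the three bucket names
lemma level_cases (s : String) :
    pvSensMap.getD s "low_sensitivity" = "high_sensitivity" ∨
    pvSensMap.getD s "low_sensitivity" = "medium_sensitivity" ∨
    pvSensMap.getD s "low_sensitivity" = "low_sensitivity" := by
  rw [show pvSensMap = PySem.Dict.mk
      [("ssn", "high_sensitivity"), ("credit_card", "high_sensitivity"),
       ("email", "medium_sensitivity"), ("phone", "medium_sensitivity"),
       ("ner_person", "medium_sensitivity"), ("contextual_identifier", "medium_sensitivity"),
       ("ip_address", "low_sensitivity"), ("url", "low_sensitivity")] from rfl]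
  simp only [PySem.Dict.getD, PySem.Dict.get?_mk_cons]
  split_ifs <;> simp [PySem.Dict.get?]

lemma pvLevel_cases (p : List (String × String)) :
    pvLevel p = "high_sensitivity" ∨ pvLevel p = "medium_sensitivity" ∨
    pvLevel p = "low_sensitivity" := by
  unfold pvLevel
  cases p.lookup "type" with
  | none => simp
  | some ty => exact level_cases ty

-- loop invariant: A's fold over a 3-bucket dict appends exactly B's filters
lemma loopA_inv (xs : List (List (String × String)))
    (hx : (xs.all (fun p => (p.lookup "type").isSome)) = true)
    (H M L : List (List (String × String))) :
    xs.foldl pvStepA (some (PySem.Dict.mk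
      [("high_sensitivity", H), ("medium_sensitivity", M), ("low_sensitivity", L)])) =
    some (PySem.Dict.mk
      [("high_sensitivity", H ++ xs.filter (fun p => pvLevel p == "high_sensitivity")),
       ("medium_sensitivity", M ++ xs.filter (fun p => pvLevel p == "medium_sensitivity")),
       ("low_sensitivity", L ++ xs.filter (fun p => pvLevel p == "low_sensitivity"))]) := by
  induction xs generalizing H M L with
  | nil => simp
  | cons p xs ih =>
    simp only [List.all_cons, Bool.and_eq_true] at hx
    obtain ⟨hp, hxs⟩ := hx
    obtain ⟨ty, hty⟩ := Option.isSome_iff_exists.mp hp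
    have hstep : pvStepA (some (PySem.Dict.mk
        [("high_sensitivity", H), ("medium_sensitivity", M), ("low_sensitivity", L)])) p =
        some (PySem.Dict.modify (PySem.Dict.mk
        [("high_sensitivity", H), ("medium_sensitivity", M), ("low_sensitivity", L)])
        (pvLevel p) [] (fun l => l ++ [p])) := by
      simp [pvStepA, pvLevel, hty]
    rw [List.foldl_cons, hstep]
    rcases pvLevel_cases p with h | h | h
    · rw [h, show PySem.Dict.modify (PySem.Dict.mk
          [("high_sensitivity", H), ("medium_sensitivity", M), ("low_sensitivity", L)])
          "high_sensitivity" [] (fun l => l ++ [p]) = PySem.Dict.mk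
          [("high_sensitivity", H ++ [p]), ("medium_sensitivity", M), ("low_sensitivity", L)] by
        simp [PySem.Dict.modify, PySem.Dict.contains, PySem.Dict.get?, PySem.Dict.getD,
          PySem.Dict.insert], ih hxs]
      simp [h]
    · rw [h, show PySem.Dict.modify (PySem.Dict.mk
          [("high_sensitivity", H), ("medium_sensitivity", M), ("low_sensitivity", L)])
          "medium_sensitivity" [] (fun l => l ++ [p]) = PySem.Dict.mk
          [("high_sensitivity", H), ("medium_sensitivity", M ++ [p]), ("low_sensitivity", L)] by
        simp [PySem.Dict.modify, PySem.Dict.contains, PySem.Dict.get?, PySem.Dict.getD,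
          PySem.Dict.insert], ih hxs]
      simp [h]
    · rw [h, show PySem.Dict.modify (PySem.Dict.mk
          [("high_sensitivity", H), ("medium_sensitivity", M), ("low_sensitivity", L)])
          "low_sensitivity" [] (fun l => l ++ [p]) = PySem.Dict.mk
          [("high_sensitivity", H), ("medium_sensitivity", M), ("low_sensitivity", L ++ [p])] by
        simp [PySem.Dict.modify, PySem.Dict.contains, PySem.Dict.get?, PySem.Dict.getD,
          PySem.Dict.insert], ih hxs]
      simp [h]

-- ===== VERDICT (by name: the statement is the Claim_ definition above) =====
theorem classify_pii_py_spec : Claim_equal_classify_pii_py := by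
  intro pii_found _hdom hpre
  unfold Spec_classify_pii_py classify_pii_py classify_pii_py_alt
  have h := loopA_inv pii_found hpre [] [] []
  rw [show pvClassification0 = PySem.Dict.mk
      [("high_sensitivity", []), ("medium_sensitivity", []), ("low_sensitivity", [])] from rfl,
    h]
  simp [PySem.Dict.items]
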